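-- pv_equiv track=rewrite | github.com/Ch-Adrian/Introduction_to_Computer_Science_Course | Kolokwium/kol2019zad2.py | niepJed
-- ===== SOURCE A (Python) =====
-- end = None
--
-- def niepJed(t):
--     N=len(t)
--     #maksymalnie mogą być 2 liczby o parzystej liczbie jedynek
--     T2 = [ (-1,-1) , (-1,-1) ]
--     wskT2 = 0
--
--     #czy t[i][j] ma nieparzysta liczbe jedynek
--     for i in range(N):
--         for j in range(N):
--             temp = t[i][j]
--             ileJed = 0
--             while temp>0:
--                 if temp%2:
--                     ileJed += 1
--                 end
--                 temp //= 2
--             end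
--
--             if not ileJed%2:
--                 if wskT2<2:
--                     T2[wskT2] = i,j
--                     wskT2 += 1
--                 else:
--                     return False
--                 end
--             end
--         end
--     end
--
--     # sprawdzamy czy znaleziono jakąkolwiek liczbę o parzystej ilości jedynek
--     if wskT2 == 0:
--         return True
--     else:
--         if T2[0][0] != T2[1][0]: return False
--     end
--
--     return True
-- ===== SOURCE B (Python) =====
-- def _even_popcount(v):
--     p = 0
--     while v > 0:
--         p ^= v % 2
--         v //= 2
--     return p == 0
--
-- def niepJed(t):
--     N = len(t)
--     counts = [len([v for v in row[:N] if _even_popcount(v)]) for row in t]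
--     tot = sum(counts)
--     return tot == 0 or (tot == 2 and 2 in counts)
-- ===== Notes on version B (the rewrite author's own statement) =====
-- stated objective: alternative
-- what changed: Instead of A's coordinate-tracking 2-slot buffer with pointer and mid-loop early return, B computes per-row counts of even-popcount cells and decides purely arithmetically: accept iff the total count is 0, or the total is 2 and some single row holds both (a count of 2 appears).
import Mathlib
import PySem

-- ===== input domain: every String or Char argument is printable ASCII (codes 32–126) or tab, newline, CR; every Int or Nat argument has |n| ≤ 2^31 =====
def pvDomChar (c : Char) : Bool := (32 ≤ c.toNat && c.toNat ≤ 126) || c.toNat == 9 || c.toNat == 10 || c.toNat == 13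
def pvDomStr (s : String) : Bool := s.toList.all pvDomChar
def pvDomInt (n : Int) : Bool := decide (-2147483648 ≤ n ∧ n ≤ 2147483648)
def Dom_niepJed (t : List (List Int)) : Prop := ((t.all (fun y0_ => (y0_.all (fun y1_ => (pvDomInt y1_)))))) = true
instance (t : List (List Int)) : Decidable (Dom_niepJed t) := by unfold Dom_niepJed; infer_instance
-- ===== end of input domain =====

-- B drops A's coordinate-tracking 2-slot buffer/pointer with mid-loop early return and instead
-- builds per-row counts of even-popcount cells, deciding arithmetically from the total and the
-- presence of a row count of 2 (alternative decomposition; same asymptotic cost).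

-- ===== PORT A =====
-- A's inner popcount loop: while temp>0: if temp%2: ileJed+=1; temp//=2
def pvIleJedLoop (temp : Int) (ileJed : Nat) : Nat :=
  if _h : 0 < temp then
    pvIleJedLoop (PySem.Int.floordiv temp 2)
      (if PySem.Int.mod temp 2 ≠ 0 then ileJed + 1 else ileJed)
  else ileJed
termination_by temp.toNat
decreasing_by
  rw [PySem.Int.floordiv_eq_ediv_of_pos (by omega)]; omega

-- A's nested for-loops over i, j with the 2-slot buffer (T20, T21), pointer wsk and early return
def niepJedGo (t : List (List Int)) (N i j : Nat) (T20 T21 : Int × Int) (wsk : Nat) : Bool :=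
  if _hi : i < N then
    if _hj : j < N then
      let temp := PySem.List.pyGetD (PySem.List.pyGetD t (i : Int) []) (j : Int) 0
      let ileJed := pvIleJedLoop temp 0
      if ileJed % 2 = 0 then
        if wsk < 2 then
          if wsk = 0 then niepJedGo t N i (j+1) ((i : Int), (j : Int)) T21 (wsk+1)
          else niepJedGo t N i (j+1) T20 ((i : Int), (j : Int)) (wsk+1)
        else false
      else niepJedGo t N i (j+1) T20 T21 wsk
    else niepJedGo t N (i+1) 0 T20 T21 wsk
  else
    if wsk = 0 then true
    else if T20.1 ≠ T21.1 then false else true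
termination_by (N - i, N - j)

def niepJed (t : List (List Int)) : Bool :=
  niepJedGo t t.length 0 0 (-1, -1) (-1, -1) 0

-- ===== PORT B =====
-- Source B helper: p = 0; while v > 0: p ^= v % 2; v //= 2; return p == 0
def pvParLoop (v p : Int) : Int :=
  if _h : 0 < v then pvParLoop (PySem.Int.floordiv v 2) (Int.xor p (PySem.Int.mod v 2)) else p
termination_by v.toNat
decreasing_by
  rw [PySem.Int.floordiv_eq_ediv_of_pos (by omega)]; omega

def pvEvenPopcount (v : Int) : Bool := pvParLoop v 0 == 0

-- counts = [len([v for v in row[:N] if _even_popcount(v)]) for row in t]; tot = sum(counts)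
def niepJed_alt (t : List (List Int)) : Bool :=
  let N := t.length
  let counts : List Int := t.map (fun row =>
    (((PySem.List.slice row none (some (N : Int))).filter pvEvenPopcount).length : Int))
  let tot := counts.sum
  tot == 0 || (tot == 2 && counts.contains 2)

-- ===== PRECONDITION & SPEC =====
-- number of even-popcount cells A scans up to (and including) the existing cells of the first
-- row shorter than N, in scan order
def scanEvens (N : Nat) : List (List Int) → Nat
  | [] => 0
  | row :: rest =>
      if N ≤ row.length then ((row.take N).filter pvEvenPopcount).length + scanEvens N rest
      else ((row.take N).filter pvEvenPopcount).length

-- Pre_ holds exactly when the Python A returns: either every row has length ≥ len(t) (the full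
-- N×N scan succeeds), or at least three even-popcount cells occur before the first short row
-- runs out, so A early-returns False before its IndexError.
def Pre_niepJed (t : List (List Int)) : Prop :=
  (∀ r ∈ t, t.length ≤ r.length) ∨ 3 ≤ scanEvens t.length t
instance (t : List (List Int)) : Decidable (Pre_niepJed t) := by unfold Pre_niepJed; infer_instance

def pvWitness_niepJed : List (List Int) := [[1, 2], [3, 0]]

def Spec_niepJed (t : List (List Int)) (out : Bool) : Prop := out = niepJed_alt t
instance (t : List (List Int)) (out : Bool) : Decidable (Spec_niepJed t out) := by unfold Spec_niepJed; infer_instance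

-- ===== CLAIM (what is proved, stated in full; the proofs are below) =====
def Claim_equal_niepJed : Prop := ∀ (t : List (List Int)), Dom_niepJed t → Pre_niepJed t → Spec_niepJed t (niepJed t)

-- ===== LEMMAS AND PROOFS =====

-- the list of even-popcount cells of row i (as A traverses it)
def rowEvens (t : List (List Int)) (N : Nat) (i : Int) : List (Int × Int) :=
  (PySem.List.pyRange 0 (N : Int) 1).filterMap (fun jj =>
    if pvEvenPopcount (PySem.List.pyGetD (PySem.List.pyGetD t i []) jj 0) then some (i, jj)
    else none)

-- the list of even-popcount cells from position (i, j) on, in A's traversal order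
def evensFrom (t : List (List Int)) (N i j : Nat) : List (Int × Int) :=
  if _hi : i < N then
    if _hj : j < N then
      if pvEvenPopcount (PySem.List.pyGetD (PySem.List.pyGetD t (i : Int) []) (j : Int) 0)
      then ((i : Int), (j : Int)) :: evensFrom t N i (j+1)
      else evensFrom t N i (j+1)
    else evensFrom t N (i+1) 0
  else []
termination_by (N - i, N - j)

-- A's buffer/pointer state machine replayed over a list of even cells
def pvFinish (T20 T21 : Int × Int) (wsk : Nat) : List (Int × Int) → Bool
  | [] => if wsk = 0 then true else if T20.1 ≠ T21.1 then false else true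
  | e :: rest =>
      if wsk < 2 then
        if wsk = 0 then pvFinish e T21 (wsk+1) rest else pvFinish T20 e (wsk+1) rest
      else false

theorem pvIleJedLoop_acc (v : Int) (c : Nat) : pvIleJedLoop v c = c + pvIleJedLoop v 0 := by
  by_cases h : 0 < v
  · rw [pvIleJedLoop, dif_pos h]
    conv_rhs => rw [pvIleJedLoop, dif_pos h]
    rw [pvIleJedLoop_acc (PySem.Int.floordiv v 2) (if PySem.Int.mod v 2 ≠ 0 then c + 1 else c),
        pvIleJedLoop_acc (PySem.Int.floordiv v 2) (if PySem.Int.mod v 2 ≠ 0 then 0 + 1 else 0)]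
    split <;> omega
  · rw [pvIleJedLoop, dif_neg h]
    conv_rhs => rw [pvIleJedLoop, dif_neg h]
    omega
termination_by v.toNat
decreasing_by all_goals (rw [PySem.Int.floordiv_eq_ediv_of_pos (by omega)]; omega)

theorem pvParLoop_eq (v p : Int) (hp : p = 0 ∨ p = 1) :
    pvParLoop v p = (((p.toNat + pvIleJedLoop v 0) % 2 : Nat) : Int) := by
  by_cases h : 0 < v
  · have hm : PySem.Int.mod v 2 = 0 ∨ PySem.Int.mod v 2 = 1 := by
      rw [PySem.Int.mod_eq_emod_of_pos (by omega)]; omega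
    rw [pvParLoop, dif_pos h,
        pvParLoop_eq (PySem.Int.floordiv v 2) (Int.xor p (PySem.Int.mod v 2))
          (by rcases hp with h0 | h0 <;> rcases hm with h1 | h1 <;> rw [h0, h1] <;> decide)]
    conv_rhs => rw [pvIleJedLoop, dif_pos h, pvIleJedLoop_acc]
    rcases hp with h0 | h0 <;> rcases hm with h1 | h1 <;>
      · rw [h0, h1]
        norm_num [show Int.xor (0 : Int) 0 = 0 from by decide, show Int.xor (0 : Int) 1 = 1 from by decide,
                  show Int.xor (1 : Int) 0 = 1 from by decide, show Int.xor (1 : Int) 1 = 0 from by decide]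
        try omega
  · rw [pvParLoop, dif_neg h]
    conv_rhs => rw [pvIleJedLoop, dif_neg h]
    rcases hp with h0 | h0 <;> rw [h0] <;> decide
termination_by v.toNat
decreasing_by all_goals (rw [PySem.Int.floordiv_eq_ediv_of_pos (by omega)]; omega)

theorem pvEvenPopcount_iff (v : Int) : pvEvenPopcount v = true ↔ pvIleJedLoop v 0 % 2 = 0 := by
  unfold pvEvenPopcount
  rw [pvParLoop_eq v 0 (Or.inl rfl)]
  simp
  omega

theorem niepJedGo_eq_finish (t : List (List Int)) (N i j : Nat) (T20 T21 : Int × Int) (wsk : Nat) :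
    niepJedGo t N i j T20 T21 wsk = pvFinish T20 T21 wsk (evensFrom t N i j) := by
  fun_induction evensFrom t N i j generalizing T20 T21 wsk with
  | case1 i j hi hj hc ih =>
    have hp := (pvEvenPopcount_iff _).mp hc
    rw [niepJedGo, dif_pos hi, dif_pos hj]
    simp only [hp, pvFinish, if_pos]
    split_ifs <;> first | apply ih | rfl
  | case2 i j hi hj hc ih =>
    have hp : ¬ pvIleJedLoop (PySem.List.pyGetD (PySem.List.pyGetD t (i : Int) []) (j : Int) 0) 0 % 2 = 0 := by
      intro hx
      exact hc ((pvEvenPopcount_iff _).mpr hx)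
    rw [niepJedGo, dif_pos hi, dif_pos hj]
    simp only [hp, if_false]
    exact ih T20 T21 wsk
  | case3 i j hi hj ih =>
    rw [niepJedGo, dif_pos hi, dif_neg hj]
    exact ih T20 T21 wsk
  | case4 i j hi =>
    rw [niepJedGo, dif_neg hi]
    rfl

theorem evensFrom_nonneg (t : List (List Int)) (N i j : Nat) :
    ∀ e ∈ evensFrom t N i j, 0 ≤ e.1 := by
  fun_induction evensFrom t N i j with
  | case1 i j hi hj hc ih =>
    intro e he
    rcases List.mem_cons.mp he with h | h
    · rw [h]; positivity
    · exact ih e h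
  | case2 i j hi hj hc ih =>
    intro e he
    exact ih e he
  | case3 i j hi hj ih =>
    intro e he
    exact ih e he
  | case4 i j hi =>
    intro e he
    simp at he

theorem evensFrom_inner (t : List (List Int)) (N i : Nat) (hi : i < N) :
    ∀ k j, j + k = N →
      evensFrom t N i j =
        (PySem.List.pyRange (j : Int) (N : Int) 1).filterMap (fun jj =>
          if pvEvenPopcount (PySem.List.pyGetD (PySem.List.pyGetD t (i : Int) []) jj 0)
          then some ((i : Int), jj) else none) ++ evensFrom t N (i+1) 0 := by
  intro k
  induction k with
  | zero =>
    intro j hj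
    have hjN : j = N := by omega
    subst hjN
    rw [evensFrom, dif_pos hi, dif_neg (by omega), PySem.List.pyRange_one_eq_nil (by omega)]
    simp
  | succ k ih =>
    intro j hj
    have hjN : j < N := by omega
    rw [evensFrom, dif_pos hi, dif_pos hjN,
        PySem.List.pyRange_one_cons (by exact_mod_cast hjN)]
    rw [List.filterMap_cons]
    have hcast : ((j : Int) + 1) = ((j + 1 : Nat) : Int) := by push_cast; ring
    rw [hcast, ih (j + 1) (by omega)]
    split <;> simp

theorem evensFrom_outer (t : List (List Int)) (N : Nat) :
    ∀ k i, i + k = N →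
      evensFrom t N i 0 =
        ((PySem.List.pyRange (i : Int) (N : Int) 1).map (rowEvens t N)).flatten := by
  intro k
  induction k with
  | zero =>
    intro i hi
    have hiN : i = N := by omega
    subst hiN
    rw [evensFrom, dif_neg (by omega),
        PySem.List.pyRange_one_eq_nil (a := (i : Int)) (b := (i : Int)) (le_refl _)]
    rfl
  | succ k ih =>
    intro i hi
    have hiN : i < N := by omega
    rw [evensFrom_inner t N i hiN N 0 (by omega),
        PySem.List.pyRange_one_cons (a := (i : Int)) (b := (N : Int)) (by exact_mod_cast hiN),
        List.map_cons, List.flatten_cons]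
    have hcast : ((i : Int) + 1) = ((i + 1 : Nat) : Int) := by push_cast; ring
    rw [hcast, ← ih (i + 1) (by omega)]
    simp [rowEvens]

-- every cell recorded for row i carries row index i
theorem rowEvens_fst (t : List (List Int)) (N : Nat) (i : Int) :
    ∀ e ∈ rowEvens t N i, e.1 = i := by
  intro e he
  unfold rowEvens at he
  rcases List.mem_filterMap.mp he with ⟨jj, _, hif⟩
  split at hif
  · cases hif; rfl
  · cases hif

-- the number of cells recorded for a row equals B's filter count over that row's first n entries
theorem rowCount_eq (r : List Int) (x : Int) (n : Nat) (hn : n ≤ r.length) :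
    ∀ k j, j + k = n →
      ((PySem.List.pyRange (j : Int) (n : Int) 1).filterMap (fun jj =>
        if pvEvenPopcount (PySem.List.pyGetD r jj 0) then some (x, jj) else none)).length
      = (((r.take n).drop j).filter pvEvenPopcount).length := by
  intro k
  induction k with
  | zero =>
    intro j hj
    have hjn : j = n := by omega
    subst hjn
    rw [PySem.List.pyRange_one_eq_nil (le_refl _),
        List.drop_eq_nil_of_le (by simp)]
    rfl
  | succ k ih =>
    intro j hj
    have hjn : j < n := by omega
    have hjr : j < r.length := by omega
    have hjt : j < (r.take n).length := by simp; omega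
    rw [PySem.List.pyRange_one_cons (by exact_mod_cast hjn), List.filterMap_cons,
        List.drop_eq_getElem_cons hjt, List.filter_cons]
    have hstep := ih (j + 1) (by omega)
    have hget : PySem.List.pyGetD r (j : Int) 0 = r[j] := by
      rw [PySem.List.pyGetD_natCast]; exact List.getD_eq_getElem r 0 hjr
    have hgt : (r.take n)[j] = r[j] := List.getElem_take
    have hcast : ((j : Int) + 1) = ((j + 1 : Nat) : Int) := by push_cast; ring
    rw [hget, hgt]
    by_cases hc : pvEvenPopcount r[j] = true
    · rw [if_pos hc, if_pos hc]
      dsimp only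
      rw [List.length_cons, List.length_cons, hcast, hstep]
    · rw [if_neg hc, if_neg hc]
      dsimp only
      rw [hcast, hstep]

-- B's per-row counts are the lengths of the per-row even-cell lists
theorem counts_eq (t : List (List Int)) (hpre : ∀ r ∈ t, t.length ≤ r.length) :
    ∀ k i, i + k = t.length →
      (t.drop i).map (fun row =>
          (((PySem.List.slice row none (some ((t.length : Nat) : Int))).filter pvEvenPopcount).length : Int))
      = ((PySem.List.pyRange (i : Int) ((t.length : Nat) : Int) 1).map (rowEvens t t.length)).map
          (fun l => ((l.length : Nat) : Int)) := by
  intro k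
  induction k with
  | zero =>
    intro i hi
    have hiN : i = t.length := by omega
    subst hiN
    rw [List.drop_eq_nil_of_le (le_refl _), PySem.List.pyRange_one_eq_nil (le_refl _)]
    rfl
  | succ k ih =>
    intro i hi
    have hiN : i < t.length := by omega
    rw [List.drop_eq_getElem_cons hiN, List.map_cons,
        PySem.List.pyRange_one_cons (by exact_mod_cast hiN), List.map_cons, List.map_cons]
    have hcast : ((i : Int) + 1) = ((i + 1 : Nat) : Int) := by push_cast; ring
    rw [hcast, ih (i + 1) (by omega)]
    have hrow : PySem.List.pyGetD t (i : Int) [] = t[i] := by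
      rw [PySem.List.pyGetD_natCast]; exact List.getD_eq_getElem t [] hiN
    have hlen : t.length ≤ t[i].length := hpre _ (List.getElem_mem hiN)
    congr 1
    rw [PySem.List.slice_to_natCast t[i] t.length]
    unfold rowEvens
    rw [hrow]
    have h := rowCount_eq t[i] (i : Int) t.length hlen t.length 0 (by omega)
    rw [Nat.cast_zero, List.drop_zero] at h
    rw [h]

-- cast bridge: the Int counts contain 2 iff the Nat lengths contain 2
theorem contains_two_iff (LL : List (List (Int × Int))) :
    ((LL.map (fun l => ((l.length : Nat) : Int))).contains 2) = true ↔ 2 ∈ LL.map List.length := by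
  simp only [List.contains_iff_mem, List.mem_map]
  constructor
  · rintro ⟨l, hl, h2⟩
    exact ⟨l, hl, by omega⟩
  · rintro ⟨l, hl, h2⟩
    exact ⟨l, hl, by omega⟩

-- sum bridge: the Int counts sum to the number of even cells
theorem sum_counts_eq (LL : List (List (Int × Int))) :
    (LL.map (fun l => ((l.length : Nat) : Int))).sum = ((LL.flatten.length : Nat) : Int) := by
  induction LL with
  | nil => rfl
  | cons l rest ih => simp [ih]

-- the crux: with rows grouped (equal inside a block, distinct across blocks), a flatten of
-- exactly two cells has both in one block iff some block has length 2
theorem flatten_two_iff (LL : List (List (Int × Int))) (a b : Int × Int)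
    (hpw : LL.Pairwise (fun l1 l2 => ∀ x ∈ l1, ∀ y ∈ l2, x.1 ≠ y.1))
    (hin : ∀ l ∈ LL, ∀ x ∈ l, ∀ y ∈ l, x.1 = y.1)
    (hfl : LL.flatten = [a, b]) :
    (2 ∈ LL.map List.length ↔ a.1 = b.1) := by
  induction LL with
  | nil => simp at hfl
  | cons L rest ih =>
    match L with
    | [] =>
      simp only [List.flatten_cons, List.nil_append] at hfl
      have := ih (List.Pairwise.of_cons hpw) (fun l hl => hin l (List.mem_cons_of_mem _ hl)) hfl
      simpa using this
    | [x] =>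
      simp only [List.flatten_cons, List.cons_append, List.nil_append, List.cons.injEq] at hfl
      obtain ⟨hxa, hflr⟩ := hfl
      have hb : b ∈ rest.flatten := by rw [hflr]; simp
      rcases List.mem_flatten.mp hb with ⟨l', hl', hbl'⟩
      have hne : x.1 ≠ b.1 := (List.pairwise_cons.mp hpw).1 l' hl' x (by simp) b hbl'
      have hsum : (rest.map List.length).sum = 1 := by
        rw [← List.length_flatten, hflr]; rfl
      constructor
      · intro h2
        rcases List.mem_cons.mp h2 with h | h
        · simp at h
        · have : (2 : Nat) ≤ (rest.map List.length).sum := List.single_le_sum (by simp) _ h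
          omega
      · intro hab
        exact absurd (hxa ▸ hab) hne
    | x :: y :: L' =>
      have hkey : x = a ∧ y = b ∧ L' = [] := by
        simp only [List.flatten_cons, List.cons_append, List.cons.injEq] at hfl
        obtain ⟨h1, h2, h3⟩ := hfl
        rcases List.append_eq_nil_iff.mp h3 with ⟨h4, h5⟩
        exact ⟨h1, h2, h4⟩
      obtain ⟨hxa, hyb, hL'⟩ := hkey
      constructor
      · intro _
        rw [← hxa, ← hyb]
        exact hin (x :: y :: L') (by simp) x (by simp) y (by simp)
      · intro _
        subst hL'
        simp
  
-- the decision read off the replayed state machine vs B's arithmetic on the counts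
theorem pvFinish_counts (LL : List (List (Int × Int)))
    (hnn : ∀ e ∈ LL.flatten, 0 ≤ e.1)
    (hin : ∀ l ∈ LL, ∀ x ∈ l, ∀ y ∈ l, x.1 = y.1)
    (hpw : LL.Pairwise (fun l1 l2 => ∀ x ∈ l1, ∀ y ∈ l2, x.1 ≠ y.1)) :
    pvFinish (-1, -1) (-1, -1) 0 LL.flatten =
      ((LL.map (fun l => ((l.length : Nat) : Int))).sum == 0 ||
       ((LL.map (fun l => ((l.length : Nat) : Int))).sum == 2 &&
        (LL.map (fun l => ((l.length : Nat) : Int))).contains 2)) := by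
  rw [sum_counts_eq]
  rcases hl : LL.flatten with - | ⟨a, - | ⟨b, - | ⟨c, r⟩⟩⟩
  · simp [pvFinish]
  · have ha : 0 ≤ a.1 := hnn a (by rw [hl]; simp)
    have hne : a.1 ≠ -1 := by omega
    rw [show pvFinish (-1, -1) (-1, -1) 0 [a] = (if a.1 ≠ -1 then false else true) from rfl,
        if_pos hne]
    simp
  · have h2 := flatten_two_iff LL a b hpw hin hl
    rw [← contains_two_iff] at h2
    rw [show pvFinish (-1, -1) (-1, -1) 0 [a, b] = (if a.1 ≠ b.1 then false else true) from rfl,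
        show ((([a, b] : List (Int × Int)).length : Nat) : Int) = (2 : Int) by simp,
        show ((2 : Int) == 0) = false from rfl, show ((2 : Int) == 2) = true from rfl,
        Bool.false_or, Bool.true_and]
    by_cases hab : a.1 = b.1
    · rw [if_neg (by simpa using hab)]
      exact (h2.mpr hab).symm
    · rw [if_pos hab]
      exact (Bool.eq_false_iff.mpr (fun h => hab (h2.mp h))).symm
  · rw [show pvFinish (-1, -1) (-1, -1) 0 (a :: b :: c :: r) = false from rfl]
    simp
    refine ⟨by omega, fun h => absurd h (by omega)⟩

-- an even-cell in a row's scanned prefix is recorded for that row (default-read cells only add)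
theorem rowCount_ge (r : List Int) (x : Int) (n : Nat) :
    ∀ k j, j + k = n →
      (((r.take n).drop j).filter pvEvenPopcount).length ≤
      ((PySem.List.pyRange (j : Int) (n : Int) 1).filterMap (fun jj =>
        if pvEvenPopcount (PySem.List.pyGetD r jj 0) then some (x, jj) else none)).length := by
  intro k
  induction k with
  | zero =>
    intro j hj
    have hjn : j = n := by omega
    subst hjn
    rw [List.drop_eq_nil_of_le (by simp)]
    simp
  | succ k ih =>
    intro j hj
    have hjn : j < n := by omega
    rw [PySem.List.pyRange_one_cons (by exact_mod_cast hjn), List.filterMap_cons]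
    have hstep := ih (j + 1) (by omega)
    have hcast : ((j : Int) + 1) = ((j + 1 : Nat) : Int) := by push_cast; ring
    rw [hcast]
    by_cases hjt : j < (r.take n).length
    · have hjr : j < r.length := by simp at hjt; omega
      have hget : PySem.List.pyGetD r (j : Int) 0 = r[j] := by
        rw [PySem.List.pyGetD_natCast]; exact List.getD_eq_getElem r 0 hjr
      have hgt : (r.take n)[j] = r[j] := List.getElem_take
      rw [List.drop_eq_getElem_cons hjt, List.filter_cons, hget, hgt]
      by_cases hc : pvEvenPopcount r[j] = true
      · rw [if_pos hc, if_pos hc]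
        dsimp only
        rw [List.length_cons, List.length_cons]
        omega
      · rw [if_neg hc, if_neg hc]
        dsimp only
        exact hstep
    · rw [List.drop_eq_nil_of_le (by omega)]
      simp

-- the scanned-prefix even count is bounded by the number of recorded even cells
theorem scan_le_flatten (t : List (List Int)) :
    ∀ k i, i + k = t.length →
      scanEvens t.length (t.drop i) ≤
        (((PySem.List.pyRange (i : Int) ((t.length : Nat) : Int) 1).map (rowEvens t t.length)).flatten).length := by
  intro k
  induction k with
  | zero =>
    intro i hi
    have hiN : i = t.length := by omega
    subst hiN
    rw [List.drop_eq_nil_of_le (le_refl _)]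
    simp [scanEvens]
  | succ k ih =>
    intro i hi
    have hiN : i < t.length := by omega
    rw [List.drop_eq_getElem_cons hiN,
        PySem.List.pyRange_one_cons (by exact_mod_cast hiN), List.map_cons, List.flatten_cons,
        List.length_append]
    have hcast : ((i : Int) + 1) = ((i + 1 : Nat) : Int) := by push_cast; ring
    have hrow : PySem.List.pyGetD t (i : Int) [] = t[i] := by
      rw [PySem.List.pyGetD_natCast]; exact List.getD_eq_getElem t [] hiN
    have hr := rowCount_ge t[i] (i : Int) t.length t.length 0 (by omega)
    rw [Nat.cast_zero, List.drop_zero] at hr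
    have hrow_le : ((t[i].take t.length).filter pvEvenPopcount).length ≤ (rowEvens t t.length (i : Int)).length := by
      unfold rowEvens
      rw [hrow]
      exact hr
    have hrest := ih (i + 1) (by omega)
    rw [hcast]
    by_cases hfull : t.length ≤ t[i].length
    · rw [scanEvens, if_pos hfull]
      omega
    · rw [scanEvens, if_neg hfull]
      omega

-- the scanned-prefix even count is bounded by B's total
theorem scan_le_sum (N : Nat) (t : List (List Int)) :
    scanEvens N t ≤ (t.map (fun row => ((row.take N).filter pvEvenPopcount).length)).sum := by
  induction t with
  | nil => simp [scanEvens]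
  | cons row rest ih =>
    rw [scanEvens, List.map_cons, List.sum_cons]
    by_cases hfull : N ≤ row.length
    · rw [if_pos hfull]; omega
    · rw [if_neg hfull]; omega

-- Int/Nat cast of B's total
theorem map_cast_sum (N : Nat) (t : List (List Int)) :
    (t.map (fun row => ((((row.take N).filter pvEvenPopcount).length : Nat) : Int))).sum =
      (((t.map (fun row => ((row.take N).filter pvEvenPopcount).length)).sum : Nat) : Int) := by
  induction t with
  | nil => rfl
  | cons row rest ih => simp [ih]

-- three or more recorded even cells make A's state machine return False
theorem pvFinish_three (l : List (Int × Int)) (hl : 3 ≤ l.length) :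
    pvFinish (-1, -1) (-1, -1) 0 l = false := by
  rcases l with - | ⟨a, - | ⟨b, - | ⟨c, r⟩⟩⟩
  · simp at hl
  · simp at hl
  · simp at hl
  · rfl

-- ===== VERDICT (by name: the statement is the Claim_ definition above) =====
theorem niepJed_spec : Claim_equal_niepJed := by
  intro t _ hpre
  unfold Spec_niepJed niepJed niepJed_alt
  have houter := evensFrom_outer t t.length t.length 0 (by omega)
  rw [Nat.cast_zero] at houter
  rcases hpre with hfull | h3
  · have hcounts := counts_eq t hfull t.length 0 (by omega)
    rw [List.drop_zero, Nat.cast_zero] at hcounts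
    have hnn : ∀ e ∈ ((PySem.List.pyRange 0 ((t.length : Nat) : Int) 1).map (rowEvens t t.length)).flatten, 0 ≤ e.1 := by
      rw [← houter]
      exact evensFrom_nonneg t t.length 0 0
    have hin : ∀ l ∈ (PySem.List.pyRange 0 ((t.length : Nat) : Int) 1).map (rowEvens t t.length),
        ∀ x ∈ l, ∀ y ∈ l, x.1 = y.1 := by
      intro l hl x hx y hy
      rcases List.mem_map.mp hl with ⟨i, _, hi⟩
      rw [rowEvens_fst t t.length i x (hi ▸ hx), rowEvens_fst t t.length i y (hi ▸ hy)]
    have hpw : ((PySem.List.pyRange 0 ((t.length : Nat) : Int) 1).map (rowEvens t t.length)).Pairwise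
        (fun l1 l2 => ∀ x ∈ l1, ∀ y ∈ l2, x.1 ≠ y.1) := by
      refine List.Pairwise.map _ ?_ (PySem.List.pairwise_lt_pyRange_one (a := 0) (b := ((t.length : Nat) : Int)))
      intro i j hij x hx y hy
      rw [rowEvens_fst t t.length i x hx, rowEvens_fst t t.length j y hy]
      omega
    rw [niepJedGo_eq_finish, houter]
    simp only [hcounts]
    exact pvFinish_counts _ hnn hin hpw
  · have hlen3 : 3 ≤ (evensFrom t t.length 0 0).length := by
      rw [houter]
      calc 3 ≤ scanEvens t.length t := h3
        _ = scanEvens t.length (t.drop 0) := by rw [List.drop_zero]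
        _ ≤ _ := scan_le_flatten t t.length 0 (by omega)
    rw [niepJedGo_eq_finish, pvFinish_three _ hlen3]
    have hslice : (t.map (fun row =>
        (((PySem.List.slice row none (some ((t.length : Nat) : Int))).filter pvEvenPopcount).length : Int)))
        = t.map (fun row => ((((row.take t.length).filter pvEvenPopcount).length : Nat) : Int)) := by
      refine List.map_congr_left (fun row _ => ?_)
      rw [PySem.List.slice_to_natCast row t.length]
    have hsum : 3 ≤ (t.map (fun row => ((row.take t.length).filter pvEvenPopcount).length)).sum :=
      le_trans h3 (scan_le_sum t.length t)
    simp only [hslice, map_cast_sum]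
    have h0 : ((((t.map (fun row => ((row.take t.length).filter pvEvenPopcount).length)).sum : Nat) : Int) == 0) = false := by
      rw [beq_eq_false_iff_ne]
      omega
    have h2 : ((((t.map (fun row => ((row.take t.length).filter pvEvenPopcount).length)).sum : Nat) : Int) == 2) = false := by
      rw [beq_eq_false_iff_ne]
      intro h
      omega
    rw [h0, h2]
    simp
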